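-- pv_equiv track=rewrite | github.com/Adithya-6101/grade | grade.py | rows_of_image_builder
-- ===== SOURCE A (Python) =====
-- def rows_of_image_builder(opt1, opt2, num_rows):  # opt2 > opt1
--     opts = []
--     for i in range(num_rows):
--         opt = []
--         for j in range(len(opt1)):
--             x = round(opt1[j][0] + (opt2[j][0] - opt1[j][0]) / (num_rows + 1))
--             y = round(opt1[j][1] + (opt2[j][1] - opt1[j][1]) / (num_rows + 1))
--             opt.append((x, y, False))
--         opts.append(opt)
--     return opts
-- ===== SOURCE B (Python) =====
-- def rows_of_image_builder(opt1, opt2, num_rows):  # opt2 > opt1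
--     opts = [[] for _ in range(num_rows)]
--     if not opts:
--         return opts
--     m = num_rows + 1
--     for (ax, ay, _), (bx, by, _) in zip(opt1, opt2):
--         t = (round(ax + (bx - ax) / m), round(ay + (by - ay) / m), False)
--         for row in opts:
--             row.append(t)
--     return opts
-- ===== Notes on version B (the rewrite author's own statement) =====
-- stated objective: alternative
-- what changed: Loop interchange: A loops rows outer / points inner, recomputing every interpolated point for each row; B pre-creates the empty rows, then loops once over the zipped point pairs and appends each triple (computed once) to every row.
import Mathlib
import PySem

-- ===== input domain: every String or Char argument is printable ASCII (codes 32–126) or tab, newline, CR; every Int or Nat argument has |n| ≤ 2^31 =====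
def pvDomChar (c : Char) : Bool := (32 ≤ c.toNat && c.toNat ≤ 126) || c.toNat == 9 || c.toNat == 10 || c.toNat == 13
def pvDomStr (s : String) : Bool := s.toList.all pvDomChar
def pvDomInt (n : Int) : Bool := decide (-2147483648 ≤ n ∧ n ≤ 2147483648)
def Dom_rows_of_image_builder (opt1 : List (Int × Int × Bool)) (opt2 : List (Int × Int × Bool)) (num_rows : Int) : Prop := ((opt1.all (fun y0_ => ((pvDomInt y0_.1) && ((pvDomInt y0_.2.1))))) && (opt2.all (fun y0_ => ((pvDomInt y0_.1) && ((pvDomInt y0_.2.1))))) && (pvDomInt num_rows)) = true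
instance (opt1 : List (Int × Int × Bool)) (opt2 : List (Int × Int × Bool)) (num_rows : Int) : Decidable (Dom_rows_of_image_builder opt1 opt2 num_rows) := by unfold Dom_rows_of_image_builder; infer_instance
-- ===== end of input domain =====

-- B interchanges the loops: it pre-creates the num_rows empty rows, then walks the zipped
-- point pairs once and appends each interpolated triple to every row (objective: alternative).
-- Python's float pipeline `round(a + (b-a)/m)` is modeled exactly by hand below
-- (IEEE-754 double rounding over ℚ); PySem has no float primitive.

-- ===== PORT A =====
-- 2^e as a rational (e may be negative)
def pvExp2 (e : Int) : Rat := if 0 ≤ e then (2:Rat) ^ e.toNat else 1 / (2:Rat) ^ (-e).toNat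

-- floor(log2 x) for 0 < x by bounded scan (exact for 2^-200 ≤ x < 2^201, far beyond the domain)
def pvFloorLog2 (x : Rat) : Int :=
  (List.range 401).foldl
    (fun acc i =>
      let e : Int := (i : Int) - 200
      if pvExp2 e ≤ x ∧ x < pvExp2 (e + 1) then e else acc) 0

-- nearest integer, ties to even: Python's round() on a float value, exact
def pvRoundHalfEven (x : Rat) : Int :=
  let f := ⌊x⌋
  let r := x - (f : Rat)
  if r < 1/2 then f else if 1/2 < r then f + 1 else if f % 2 = 0 then f else f + 1

-- round a rational to the nearest IEEE-754 double (53-bit significand, ties to even);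
-- exact for normal doubles, which covers every value arising on the stated domain
def pvRoundToDouble (x : Rat) : Rat :=
  if x = 0 then 0
  else
    let s : Rat := if x < 0 then -1 else 1
    let ax := s * x
    let ulp := pvExp2 (pvFloorLog2 ax - 52)
    s * (pvRoundHalfEven (ax / ulp) : Rat) * ulp

-- round(a + (b-a)/m) in Python float arithmetic: one rounded division, one rounded
-- addition (a itself is exact as a double for |a| ≤ 2^31), then round() to int
def pvInterp (a b m : Int) : Int :=
  pvRoundHalfEven (pvRoundToDouble ((a : Rat) + pvRoundToDouble (((b - a : Int) : Rat) / (m : Rat))))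

def rows_of_image_builder (opt1 : List (Int × Int × Bool)) (opt2 : List (Int × Int × Bool)) (num_rows : Int) : List (List (Int × Int × Bool)) :=
  (PySem.List.pyRange 0 num_rows 1).foldl
    (fun opts _i =>
      opts ++ [(PySem.List.pyRange 0 (opt1.length : Int) 1).foldl
        (fun opt j =>
          let p1 := PySem.List.pyGetD opt1 j (0, 0, false)
          let p2 := PySem.List.pyGetD opt2 j (0, 0, false)
          opt ++ [(pvInterp p1.1 p2.1 (num_rows + 1), pvInterp p1.2.1 p2.2.1 (num_rows + 1), false)]) []]) []

-- ===== PORT B =====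
def rows_of_image_builder_alt (opt1 : List (Int × Int × Bool)) (opt2 : List (Int × Int × Bool)) (num_rows : Int) : List (List (Int × Int × Bool)) :=
  let opts := (PySem.List.pyRange 0 num_rows 1).map (fun _ => ([] : List (Int × Int × Bool)))
  if opts = [] then opts
  else
    let m := num_rows + 1
    (opt1.zip opt2).foldl
      (fun opts p =>
        let t := (pvInterp p.1.1 p.2.1 m, pvInterp p.1.2.1 p.2.2.1 m, false)
        opts.map (fun row => row ++ [t])) opts

-- ===== PRECONDITION & SPEC =====
-- Pre_ excludes exactly the inputs where A raises IndexError: num_rows ≥ 1 with opt2 shorter than opt1.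
def Pre_rows_of_image_builder (opt1 : List (Int × Int × Bool)) (opt2 : List (Int × Int × Bool)) (num_rows : Int) : Prop :=
  num_rows ≤ 0 ∨ opt1.length ≤ opt2.length
instance (opt1 : List (Int × Int × Bool)) (opt2 : List (Int × Int × Bool)) (num_rows : Int) : Decidable (Pre_rows_of_image_builder opt1 opt2 num_rows) := by unfold Pre_rows_of_image_builder; infer_instance

def pvWitness_rows_of_image_builder : (List (Int × Int × Bool)) × (List (Int × Int × Bool)) × Int :=
  ([(0, 0, false), (4, 2, false)], [(10, 10, false), (8, 8, false)], 3)

def Spec_rows_of_image_builder (opt1 : List (Int × Int × Bool)) (opt2 : List (Int × Int × Bool)) (num_rows : Int) (out : List (List (Int × Int × Bool))) : Prop := out = rows_of_image_builder_alt opt1 opt2 num_rows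
instance (opt1 : List (Int × Int × Bool)) (opt2 : List (Int × Int × Bool)) (num_rows : Int) (out : List (List (Int × Int × Bool))) : Decidable (Spec_rows_of_image_builder opt1 opt2 num_rows out) := by unfold Spec_rows_of_image_builder; infer_instance

-- ===== CLAIM =====
def Claim_equal_rows_of_image_builder : Prop := ∀ (opt1 : List (Int × Int × Bool)) (opt2 : List (Int × Int × Bool)) (num_rows : Int), Dom_rows_of_image_builder opt1 opt2 num_rows → Pre_rows_of_image_builder opt1 opt2 num_rows → Spec_rows_of_image_builder opt1 opt2 num_rows (rows_of_image_builder opt1 opt2 num_rows)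


-- ===== LEMMAS AND PROOFS =====
-- B's interchanged loop on a constant-per-row state: appending each g p to every row of
-- R.map (fun _ => acc) yields R.map (fun _ => acc ++ l.map g)
theorem pvFoldAppendAll {α β γ : Type} (l : List α) (R : List β) (acc : List γ) (g : α → γ) :
    l.foldl (fun opts p => opts.map (fun row => row ++ [g p])) (R.map (fun _ => acc))
      = R.map (fun _ => acc ++ l.map g) := by
  induction l generalizing acc with
  | nil => simp
  | cons a l ih =>
      simp only [List.foldl_cons]
      have e : (R.map (fun _ => acc)).map (fun row => row ++ [g a]) = R.map (fun _ => acc ++ [g a]) := by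
        simp
      rw [e, ih]
      simp

-- A's indexed inner row equals B's zip row when opt2 is at least as long as opt1
theorem pvRowEq {γ : Type} (opt1 opt2 : List (Int × Int × Bool)) (d : Int × Int × Bool)
    (g : (Int × Int × Bool) → (Int × Int × Bool) → γ) (h : opt1.length ≤ opt2.length) :
    (PySem.List.pyRange 0 (opt1.length : Int) 1).map
      (fun j => g (PySem.List.pyGetD opt1 j d) (PySem.List.pyGetD opt2 j d))
      = (opt1.zip opt2).map (fun p => g p.1 p.2) := by
  rw [PySem.List.pyRange_one]
  simp only [List.map_map]
  apply List.ext_getElem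
  · simp; omega
  · intro k h1 h2
    simp only [List.getElem_map, List.getElem_range, Function.comp_apply]
    have hk1 : k < opt1.length := by simpa using h1
    have hk2 : k < opt2.length := lt_of_lt_of_le hk1 h
    have e1 : PySem.List.pyGetD opt1 ((0:Int) + (k:Int)) d = opt1[k] := by
      rw [zero_add, PySem.List.pyGetD_natCast]
      exact List.getD_eq_getElem _ _ hk1
    have e2 : PySem.List.pyGetD opt2 ((0:Int) + (k:Int)) d = opt2[k] := by
      rw [zero_add, PySem.List.pyGetD_natCast]
      exact List.getD_eq_getElem _ _ hk2
    rw [e1, e2]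
    simp [List.getElem_zip]

-- ===== VERDICT =====
theorem rows_of_image_builder_spec : Claim_equal_rows_of_image_builder := by
  intro opt1 opt2 num_rows _hdom hpre
  unfold Spec_rows_of_image_builder rows_of_image_builder rows_of_image_builder_alt
  rw [PySem.List.foldl_append_singleton_eq_map]
  by_cases h : num_rows ≤ 0
  · rw [show PySem.List.pyRange 0 num_rows 1 = [] from PySem.List.pyRange_one_eq_nil (by omega)]
    simp
  · have hlen : opt1.length ≤ opt2.length := by
      rcases hpre with h' | h'
      · omega
      · exact h'
    have hne : (PySem.List.pyRange 0 num_rows 1).map (fun _ => ([] : List (Int × Int × Bool))) ≠ [] := by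
      rw [PySem.List.pyRange_one_cons (by omega)]
      simp
    simp only [hne]
    rw [pvFoldAppendAll]
    simp only [List.nil_append]
    congr 1
    funext _
    rw [PySem.List.foldl_append_singleton_eq_map, List.nil_append]
    exact pvRowEq opt1 opt2 (0,0,false)
      (fun p1 p2 => (pvInterp p1.1 p2.1 (num_rows + 1), pvInterp p1.2.1 p2.2.1 (num_rows + 1), false)) hlen
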